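-- pv_equiv track=rewrite | github.com/Daeell/AlGORITM-STUDY | programmers/49994/yj.py | solution
-- ===== SOURCE A (Python) =====
-- def solution(dirs):
--     answer = 0
--     # 좌표는 가로 세로 -5 ~ 5, 출발은 (0,0)
--     #예외처리
--     #1. 좌표를 벗어나는 경우
--     #2. 방문한 길인 경우
--     directions = {"U": (0,1), "D": (0,-1), "L":(-1,0), "R":(1,0)}
--     visited= set()
--     robot = [0,0]
--     for i in dirs :
--         tmpX= robot[0]+ directions[i][0]
--         tmpY = robot[1]+ directions[i][1]
--
--         if tmpX< -5 or tmpX>5 or tmpY <-5 or tmpY>5 :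
--             continue
--
--         # 이전 위치와 현재 위치를 string으로 road로 표시
--         road = str(robot) + str([tmpX, tmpY])
--
--         roadReverse= str([tmpX, tmpY]) + str(robot)
--
--         # 위치 갱신
--         robot[0]= tmpX
--         robot[1]= tmpY
--
--         if road not in visited :
--             visited.add(road)
--             visited.add(roadReverse)
--
--             answer +=1
--
--
--     return answer
-- ===== SOURCE B (Python) =====
-- def solution(dirs):
--     # Simulate the walk collecting each traversed segment as a single integer code
--     # (points are encoded into 0..120 since coordinates stay in -5..5; an undirected
--     # segment is the code smaller_point*121 + larger_point), then sort the codes and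
--     # count the distinct ones with a linear scan over the sorted list.
--     move = {"U": (0, 1), "D": (0, -1), "L": (-1, 0), "R": (1, 0)}
--     codes = []
--     x = y = 0
--     for c in dirs:
--         dx, dy = move[c]
--         nx, ny = x + dx, y + dy
--         if -5 <= nx <= 5 and -5 <= ny <= 5:
--             a = (x + 5) * 11 + (y + 5)
--             b = (nx + 5) * 11 + (ny + 5)
--             codes.append(a * 121 + b if a <= b else b * 121 + a)
--             x, y = nx, ny
--     codes.sort()
--     total = 0
--     prev = None
--     for e in codes:
--         if e != prev:
--             total += 1
--         prev = e
--     return total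
-- ===== Notes on version B (the rewrite author's own statement) =====
-- stated objective: alternative
-- what changed: B replaces A's fused loop over a hash set keyed by concatenated str() strings with an encode-sort-scan pipeline: each traversed segment is packed into one integer code (points encoded into 0..120, undirected by ordering the two point codes), the code list is sorted, and the answer is a linear scan counting positions where the sorted value changes.
import Mathlib
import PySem

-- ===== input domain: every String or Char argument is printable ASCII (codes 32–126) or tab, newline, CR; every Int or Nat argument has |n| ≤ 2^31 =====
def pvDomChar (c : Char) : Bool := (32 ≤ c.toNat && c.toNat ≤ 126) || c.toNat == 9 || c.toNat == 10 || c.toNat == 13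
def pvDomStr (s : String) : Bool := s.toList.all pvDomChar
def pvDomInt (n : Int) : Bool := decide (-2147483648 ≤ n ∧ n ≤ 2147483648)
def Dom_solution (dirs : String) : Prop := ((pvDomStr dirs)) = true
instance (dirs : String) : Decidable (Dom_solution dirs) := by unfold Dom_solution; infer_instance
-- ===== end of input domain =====

-- B replaces A's fused loop over a set of concatenated str() keys with an encode-sort-scan
-- pipeline (segments packed into integer codes, sorted, distinct ones counted by a linear scan);
-- same answers, a different algorithm of similar cost.

-- ===== PORT A =====
-- str(robot) for robot = [x, y] is "[x, y]" (PySem.Int.toChars = str(n), exact):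
def pyListChars (p : Int × Int) : List Char :=
  '[' :: (PySem.Int.toChars p.1 ++ ',' :: ' ' :: (PySem.Int.toChars p.2 ++ [']']))

def directionsA : PySem.Dict String (Int × Int) :=
  ⟨[("U", (0, 1)), ("D", (0, -1)), ("L", (-1, 0)), ("R", (1, 0))]⟩

def stepA (st : Int × PySem.Set (List Char) × (Int × Int)) (i : Char) :
    Int × PySem.Set (List Char) × (Int × Int) :=
  match st with
  | (answer, visited, robot) =>
    match PySem.Dict.get? directionsA (String.ofList [i]) with
    | none => (answer, visited, robot)  -- Python raises KeyError here; excluded by Pre_solution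
    | some d =>
      let tmpX := robot.1 + d.1
      let tmpY := robot.2 + d.2
      if tmpX < -5 ∨ tmpX > 5 ∨ tmpY < -5 ∨ tmpY > 5 then (answer, visited, robot)
      else
        let road := pyListChars robot ++ pyListChars (tmpX, tmpY)
        let roadReverse := pyListChars (tmpX, tmpY) ++ pyListChars robot
        let robot' := (tmpX, tmpY)
        if PySem.Set.contains visited road = false then
          (answer + 1, PySem.Set.add (PySem.Set.add visited road) roadReverse, robot')
        else (answer, visited, robot')

def solution (dirs : String) : Int :=
  (dirs.toList.foldl stepA (0, PySem.Set.empty, (0, 0))).1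

-- ===== PORT B =====
def moveB : PySem.Dict String (Int × Int) :=
  ⟨[("U", (0, 1)), ("D", (0, -1)), ("L", (-1, 0)), ("R", (1, 0))]⟩

-- pass 1: walk, appending the integer code of each traversed segment
def stepB (st : List Int × Int × Int) (c : Char) : List Int × Int × Int :=
  match PySem.Dict.get? moveB (String.ofList [c]) with
  | none => st  -- Python raises KeyError here; excluded by Pre_solution
  | some d =>
    let nx := st.2.1 + d.1
    let ny := st.2.2 + d.2
    if -5 ≤ nx ∧ nx ≤ 5 ∧ -5 ≤ ny ∧ ny ≤ 5 then
      let a := (st.2.1 + 5) * 11 + (st.2.2 + 5)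
      let b := (nx + 5) * 11 + (ny + 5)
      (st.1 ++ [if a ≤ b then a * 121 + b else b * 121 + a], nx, ny)
    else st

-- pass 2 body: 'if e != prev: total += 1; prev = e'  (prev starts as None)
def scanStep (s : Int × Option Int) (e : Int) : Int × Option Int :=
  (if s.2 = some e then s.1 else s.1 + 1, some e)

def solution_alt (dirs : String) : Int :=
  let codes := (dirs.toList.foldl stepB ([], 0, 0)).1
  let sortedCodes := PySem.List.sorted codes (fun x => x) false  -- codes.sort()
  (sortedCodes.foldl scanStep (0, none)).1

-- ===== PRECONDITION & SPEC =====
-- Pre_ excludes exactly the strings with a character other than U/D/L/R, on which A (and B) raise KeyError.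
def Pre_solution (dirs : String) : Prop :=
  (dirs.toList.all (fun c => c == 'U' || c == 'D' || c == 'L' || c == 'R')) = true
instance (dirs : String) : Decidable (Pre_solution dirs) := by unfold Pre_solution; infer_instance

def pvWitness_solution : String := "UDLR"

def Spec_solution (dirs : String) (out : Int) : Prop := out = solution_alt dirs
instance (dirs : String) (out : Int) : Decidable (Spec_solution dirs out) := by unfold Spec_solution; infer_instance

-- ===== CLAIM (what is proved, stated in full; the proofs are below) =====
def Claim_equal_solution : Prop := ∀ (dirs : String), Dom_solution dirs → Pre_solution dirs → Spec_solution dirs (solution dirs)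

-- ===== LEMMAS AND PROOFS =====

def inB (p : Int × Int) : Prop := -5 ≤ p.1 ∧ p.1 ≤ 5 ∧ -5 ≤ p.2 ∧ p.2 ≤ 5

-- the integer code B appends for the segment p → q
def enc (p q : Int × Int) : Int :=
  let a := (p.1 + 5) * 11 + (p.2 + 5)
  let b := (q.1 + 5) * 11 + (q.2 + 5)
  if a ≤ b then a * 121 + b else b * 121 + a

def Lints : List Int := [-5, -4, -3, -2, -1, 0, 1, 2, 3, 4, 5]

lemma mem_Lints {x : Int} (h1 : -5 ≤ x) (h2 : x ≤ 5) : x ∈ Lints := by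
  unfold Lints; interval_cases x <;> decide

lemma noSpecial : ∀ x ∈ Lints, ',' ∉ PySem.Int.toChars x ∧ ']' ∉ PySem.Int.toChars x := by decide

lemma toChars_injB : ∀ x ∈ Lints, ∀ y ∈ Lints,
    PySem.Int.toChars x = PySem.Int.toChars y → x = y := by decide

lemma splitFirst (m : Char) : ∀ (a a' b b' : List Char), m ∉ a → m ∉ a' →
    a ++ m :: b = a' ++ m :: b' → a = a' ∧ b = b' := by
  intro a
  induction a with
  | nil =>
    intro a' b b' _ ha' h
    cases a' with
    | nil => simpa using h
    | cons x t =>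
      simp only [List.nil_append, List.cons_append, List.cons.injEq] at h
      exact absurd (h.1 ▸ List.mem_cons_self) ha'
  | cons x t ih =>
    intro a' b b' ha ha' h
    cases a' with
    | nil =>
      simp only [List.cons_append, List.nil_append, List.cons.injEq] at h
      exact absurd (h.1.symm ▸ List.mem_cons_self) ha
    | cons y t' =>
      simp only [List.cons_append, List.cons.injEq] at h
      obtain ⟨rfl, h2⟩ := h
      have := ih t' b b' (fun hm => ha (List.mem_cons_of_mem _ hm))
        (fun hm => ha' (List.mem_cons_of_mem _ hm)) h2
      exact ⟨by rw [this.1], this.2⟩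

lemma pyListChars_append_inj {p p' : Int × Int} {r r' : List Char}
    (hp : inB p) (hp' : inB p')
    (h : pyListChars p ++ r = pyListChars p' ++ r') : p = p' ∧ r = r' := by
  obtain ⟨x, y⟩ := p; obtain ⟨x', y'⟩ := p'
  obtain ⟨hx1, hx2, hy1, hy2⟩ := hp
  obtain ⟨hx1', hx2', hy1', hy2'⟩ := hp'
  simp only [pyListChars] at h
  have hform : ∀ (u v : Int) (s : List Char),
      ('[' :: (PySem.Int.toChars u ++ ',' :: ' ' :: (PySem.Int.toChars v ++ [']']))) ++ s
        = '[' :: (PySem.Int.toChars u ++ ',' :: (' ' :: (PySem.Int.toChars v ++ ']' :: s))) := by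
    intro u v s; simp
  rw [hform, hform] at h
  simp only [List.cons.injEq, true_and] at h
  have hmx := mem_Lints hx1 hx2
  have hmy := mem_Lints hy1 hy2
  have hmx' := mem_Lints hx1' hx2'
  have hmy' := mem_Lints hy1' hy2'
  obtain ⟨hxe, h2⟩ := splitFirst ',' _ _ _ _ (noSpecial x hmx).1 (noSpecial x' hmx').1 h
  simp only [List.cons.injEq, true_and] at h2
  obtain ⟨hye, h3⟩ := splitFirst ']' _ _ _ _ (noSpecial y hmy).2 (noSpecial y' hmy').2 h2
  have := toChars_injB x hmx x' hmx' hxe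
  have := toChars_injB y hmy y' hmy' hye
  constructor
  · simp_all
  · exact h3

lemma enc_eq_iff {a b p q : Int × Int} (ha : inB a) (hb : inB b) (hp : inB p) (hq : inB q) :
    enc a b = enc p q ↔ (a = p ∧ b = q) ∨ (a = q ∧ b = p) := by
  obtain ⟨a1, a2⟩ := a; obtain ⟨b1, b2⟩ := b; obtain ⟨p1, p2⟩ := p; obtain ⟨q1, q2⟩ := q
  obtain ⟨h1, h2, h3, h4⟩ := ha; obtain ⟨h5, h6, h7, h8⟩ := hb
  obtain ⟨h9, h10, h11, h12⟩ := hp; obtain ⟨h13, h14, h15, h16⟩ := hq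
  simp only [enc, Prod.mk.injEq] at *
  split_ifs <;> omega

lemma enc_comm (p q : Int × Int) : enc q p = enc p q := by
  simp only [enc]; split_ifs <;> omega

-- distinct count of a list with one extra element in front
lemma card_insert_filter (e : Int) (X : List Int) :
    (insert e X.toFinset).card = 1 + ((X.filter (fun x => x ≠ e)).toFinset).card := by
  have hset : insert e X.toFinset = insert e ((X.filter (fun x => x ≠ e)).toFinset) := by
    ext z
    simp only [Finset.mem_insert, List.mem_toFinset, List.mem_filter, decide_eq_true_eq]
    constructor
    · rintro (rfl | hz)
      · exact Or.inl rfl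
      · by_cases hz' : z = e
        · exact Or.inl hz'
        · exact Or.inr ⟨hz, hz'⟩
    · rintro (rfl | ⟨hz, _⟩)
      · exact Or.inl rfl
      · exact Or.inr hz
  rw [hset, Finset.card_insert_of_notMem (by simp), add_comm]

-- the scan over a sorted tail: prev = p, everything still to come is ≥ p
lemma scan_go : ∀ (l : List Int), l.Pairwise (· ≤ ·) → ∀ (t p : Int), (∀ x ∈ l, p ≤ x) →
    (l.foldl scanStep (t, some p)).1 = t + (((l.filter (fun x => x ≠ p)).toFinset).card : Int) := by
  intro l
  induction l with
  | nil => intro _ t p _; simp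
  | cons e rest ih =>
    intro hpw t p hall
    have hrest : rest.Pairwise (· ≤ ·) := (List.pairwise_cons.mp hpw).2
    have hge : ∀ x ∈ rest, e ≤ x := (List.pairwise_cons.mp hpw).1
    have hpe : p ≤ e := hall e List.mem_cons_self
    by_cases hep : e = p
    · subst hep
      have : (e :: rest).filter (fun x => x ≠ e) = rest.filter (fun x => x ≠ e) := by
        simp
      rw [this]
      simp only [List.foldl_cons, scanStep]
      exact ih hrest t e hge
    · have hlt : p < e := lt_of_le_of_ne hpe (fun h => hep h.symm)
      have hfe : (e :: rest).filter (fun x => x ≠ p) = e :: rest.filter (fun x => x ≠ p) := by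
        simp [hep]
      have hff : (rest.filter (fun x => x ≠ p)).filter (fun x => x ≠ e)
          = rest.filter (fun x => x ≠ e) := by
        rw [List.filter_filter]
        apply List.filter_congr
        intro x hx
        have hxp : x ≠ p := by
          have : p < x := lt_of_lt_of_le hlt (hge x hx)
          omega
        simp [hxp]
      simp only [List.foldl_cons, scanStep]
      rw [if_neg (by simp only [Option.some.injEq]; omega)]
      rw [ih hrest (t + 1) e (fun x hx => hge x hx), hfe]
      have : ((e :: rest.filter (fun x => x ≠ p)).toFinset).card
          = 1 + ((rest.filter (fun x => x ≠ e)).toFinset).card := by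
        rw [List.toFinset_cons, ← hff]
        exact card_insert_filter e (rest.filter (fun x => x ≠ p))
      rw [this]
      push_cast
      ring

-- the whole scan over a sorted list counts its distinct elements
lemma scan_top (l : List Int) (hpw : l.Pairwise (· ≤ ·)) :
    (l.foldl scanStep (0, none)).1 = (l.toFinset.card : Int) := by
  cases l with
  | nil => simp
  | cons e rest =>
    have hrest : rest.Pairwise (· ≤ ·) := (List.pairwise_cons.mp hpw).2
    have hge : ∀ x ∈ rest, e ≤ x := (List.pairwise_cons.mp hpw).1
    simp only [List.foldl_cons, scanStep]
    rw [if_neg (by simp)]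
    rw [scan_go rest hrest (0 + 1) e hge]
    rw [List.toFinset_cons, card_insert_filter e rest]
    push_cast
    ring

-- invariant tying A's loop state to B's pass-1 state
def InvAB (ans : Int) (vis : PySem.Set (List Char)) (robot : Int × Int)
    (codes : List Int) : Prop :=
  inB robot ∧ ans = (codes.toFinset.card : Int) ∧
  (∀ a b, inB a → inB b → ((pyListChars a ++ pyListChars b) ∈ vis ↔ enc a b ∈ codes))

lemma step_preserves (ans : Int) (vis : PySem.Set (List Char)) (robot : Int × Int)
    (codes : List Int) (c : Char)
    (hc : c = 'U' ∨ c = 'D' ∨ c = 'L' ∨ c = 'R')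
    (hInv : InvAB ans vis robot codes) :
    ∃ ans' vis' robot' codes', stepA (ans, vis, robot) c = (ans', vis', robot') ∧
      stepB (codes, robot) c = (codes', robot') ∧ InvAB ans' vis' robot' codes' := by
  obtain ⟨hrobot, hans, hmem⟩ := hInv
  have hd : ∃ d : Int × Int, PySem.Dict.get? directionsA (String.ofList [c]) = some d ∧
      PySem.Dict.get? moveB (String.ofList [c]) = some d := by
    rcases hc with rfl | rfl | rfl | rfl <;> exact ⟨_, rfl, rfl⟩
  obtain ⟨d, hdA, hdB⟩ := hd
  set tmp : Int × Int := (robot.1 + d.1, robot.2 + d.2) with htmp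
  by_cases hb : inB tmp
  · -- in-bounds move
    have hAguard : ¬ (tmp.1 < -5 ∨ tmp.1 > 5 ∨ tmp.2 < -5 ∨ tmp.2 > 5) := by
      obtain ⟨h1, h2, h3, h4⟩ := hb; omega
    set e : Int := enc robot tmp with he
    have hBstep : stepB (codes, robot) c = (codes ++ [e], tmp) := by
      simp only [stepB, hdB]
      rw [if_pos ⟨hb.1, hb.2.1, hb.2.2.1, hb.2.2.2⟩]
      rw [htmp, he, htmp]
      simp [enc]
    by_cases hseen : (pyListChars robot ++ pyListChars tmp) ∈ vis
    · -- edge already traversed: A's count unchanged; B appends a duplicate code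
      have hEmem : e ∈ codes := (hmem robot tmp hrobot hb).mp hseen
      refine ⟨ans, vis, tmp, codes ++ [e], ?_, hBstep, ?_, ?_, ?_⟩
      · simp only [stepA, hdA]
        rw [if_neg hAguard, if_neg]
        simp only [Bool.not_eq_false, PySem.Set.contains_iff]
        exact hseen
      · exact hb
      · rw [hans]
        congr 1
        simp only [List.toFinset_append, List.toFinset_cons, List.toFinset_nil]
        rw [Finset.union_comm]
        simp [Finset.insert_eq_self.mpr (List.mem_toFinset.mpr hEmem)]
      · intro a b ha hbb
        rw [hmem a b ha hbb, List.mem_append, List.mem_singleton]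
        constructor
        · exact Or.inl
        · rintro (h | h)
          · exact h
          · rcases (enc_eq_iff ha hbb hrobot hb).mp h with ⟨rfl, rfl⟩ | ⟨rfl, rfl⟩
            · exact hEmem
            · rwa [enc_comm]
      -- (the three goals above are the components of InvAB)
    · -- new edge: A counts it and records both orientations, B appends a fresh code
      have hEmem : e ∉ codes := fun h => hseen ((hmem robot tmp hrobot hb).mpr h)
      refine ⟨ans + 1,
        PySem.Set.add (PySem.Set.add vis (pyListChars robot ++ pyListChars tmp))
          (pyListChars tmp ++ pyListChars robot), tmp, codes ++ [e], ?_, hBstep, ?_, ?_, ?_⟩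
      · simp only [stepA, hdA]
        rw [if_neg hAguard, if_pos]
        rw [Bool.eq_false_iff]
        intro hcon
        exact hseen ((PySem.Set.contains_iff _ _).mp hcon)
      · exact hb
      · simp only [List.toFinset_append, List.toFinset_cons, List.toFinset_nil]
        rw [Finset.union_comm]
        simp only [Finset.insert_union, Finset.empty_union]
        rw [Finset.card_insert_of_notMem (by simpa using hEmem)]
        push_cast [hans]
        ring
      · intro a b ha hbb
        rw [PySem.Set.mem_add, PySem.Set.mem_add, hmem a b ha hbb, List.mem_append,
          List.mem_singleton]
        constructor
        · rintro ((h | h) | h)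
          · exact Or.inl h
          · obtain ⟨rfl, hr⟩ := pyListChars_append_inj ha hrobot h
            have hb2 : b = tmp := (pyListChars_append_inj (r := ([] : List Char))
              (r' := ([] : List Char)) hbb hb (by simpa using hr)).1
            subst hb2
            exact Or.inr he.symm
          · obtain ⟨rfl, hr⟩ := pyListChars_append_inj ha hb h
            have hb2 : b = robot := (pyListChars_append_inj (r := ([] : List Char))
              (r' := ([] : List Char)) hbb hrobot (by simpa using hr)).1
            subst hb2
            exact Or.inr (by rw [he, enc_comm])
        · rintro (h | h)
          · exact Or.inl (Or.inl h)
          · rcases (enc_eq_iff ha hbb hrobot hb).mp h with ⟨rfl, rfl⟩ | ⟨rfl, rfl⟩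
            · exact Or.inl (Or.inr rfl)
            · exact Or.inr rfl
  · -- out-of-bounds move: both programs skip
    have hAguard : tmp.1 < -5 ∨ tmp.1 > 5 ∨ tmp.2 < -5 ∨ tmp.2 > 5 := by
      by_contra hcon
      push Not at hcon
      exact hb ⟨by omega, by omega, by omega, by omega⟩
    refine ⟨ans, vis, robot, codes, ?_, ?_, hrobot, hans, hmem⟩
    · simp only [stepA, hdA]
      rw [if_pos hAguard]
    · simp only [stepB, hdB]
      rw [if_neg]
      intro hcon
      exact hb ⟨hcon.1, hcon.2.1, hcon.2.2.1, hcon.2.2.2⟩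

lemma fold_preserves : ∀ (l : List Char), (∀ c ∈ l, c = 'U' ∨ c = 'D' ∨ c = 'L' ∨ c = 'R') →
    ∀ ans vis robot codes, InvAB ans vis robot codes →
    ∃ ans' vis' robot' codes', l.foldl stepA (ans, vis, robot) = (ans', vis', robot') ∧
      l.foldl stepB (codes, robot) = (codes', robot') ∧ InvAB ans' vis' robot' codes' := by
  intro l
  induction l with
  | nil => intro _ ans vis robot codes h; exact ⟨ans, vis, robot, codes, rfl, rfl, h⟩
  | cons c t ih =>
    intro hall ans vis robot codes h
    obtain ⟨a1, v1, r1, cd1, hstepA, hstepB, hinv1⟩ :=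
      step_preserves ans vis robot codes c (hall c List.mem_cons_self) h
    simp only [List.foldl_cons, hstepA, hstepB]
    exact ih (fun x hx => hall x (List.mem_cons_of_mem _ hx)) a1 v1 r1 cd1 hinv1

-- ===== VERDICT (by name: the statement is the Claim_ definition above) =====
theorem solution_spec : Claim_equal_solution := by
  intro dirs _ hpre0
  have hpre : ∀ c ∈ dirs.toList, c = 'U' ∨ c = 'D' ∨ c = 'L' ∨ c = 'R' := by
    simp only [Pre_solution, List.all_eq_true] at hpre0
    intro c hc
    have := hpre0 c hc
    simp only [Bool.or_eq_true, beq_iff_eq] at this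
    tauto
  unfold Spec_solution solution solution_alt
  have hInv0 : InvAB 0 PySem.Set.empty (0, 0) [] := by
    refine ⟨⟨by norm_num, by norm_num, by norm_num, by norm_num⟩, by simp, ?_⟩
    intro a b _ _
    simp [PySem.Set.empty]
  obtain ⟨ans', vis', robot', codes', hfoldA, hfoldB, _, hans, _⟩ :=
    fold_preserves dirs.toList hpre 0 PySem.Set.empty (0, 0) [] hInv0
  rw [hfoldA]
  show ans' = _
  have hB : (dirs.toList.foldl stepB ([], 0, 0)).1 = codes' := by
    have : (([], 0, 0) : List Int × Int × Int) = (([], (0, 0)) : List Int × (Int × Int)) := rfl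
    rw [this, hfoldB]
  rw [hB, hans]
  have hperm : (PySem.List.sorted codes' (fun x => x) false).Perm codes' :=
    PySem.List.sorted_perm codes' (fun x => x) false
  rw [scan_top _ (by
    have := PySem.List.sorted_pairwise codes' (fun x => x)
    exact this)]
  rw [List.toFinset_eq_of_perm _ _ hperm]
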